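-- pv_equiv track=rewrite | github.com/Skymore/LeetCode_and_OA | LeetCode/kmp.py | occurences_of_prefixes
-- ===== SOURCE A (Python) =====
-- def prefix_function(s: str) -> list[int]:
--     # Calculate the prefix function of the string.
--     # The prefix function is an array pi of length n, where pi[i] is the length of the longest proper prefix of the
--     # substring s[0…i] which is also a suffix of this substring.
--     # The proper prefix is a prefix that is not equal to the string itself.
--
--     # explanation:
--     # https://www.youtube.com/watch?v=GTJr8OvyEVQ
--     n = len(s)
--     pi = [0] * n
--     for i in range(1, n):
--         j = pi[i - 1]
--         while j > 0 and s[i] != s[j]: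
--             j = pi[j - 1]
--         if s[i] == s[j]:
--             j += 1
--         pi[i] = j
--     return pi
--
-- def occurences_of_prefixes(s: str) -> list[int]:
--     pi = prefix_function(s)
--     n = len(s)
--     result = [0] * (n + 1)
--     for i in range(n):
--         result[pi[i]] += 1
--     for i in range(n - 1, 0, -1):
--         result[pi[i - 1]] += result[i]
--     for i in range(n + 1):
--         result[i] += 1
--     return result
-- ===== SOURCE B (Python) =====
-- def occurences_of_prefixes(s: str) -> list[int]:
--     # Direct counting: result[L] = number of occurrences of the prefix of
--     # length L as a substring (occurrence ending at j iff s[j-L:j] == s[:L]);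
--     # result[0] = n + 1 by the empty-prefix convention.
--     n = len(s)
--     result = [n + 1]
--     for L in range(1, n + 1):
--         prefix = s[:L]
--         result.append(sum(1 for j in range(L, n + 1) if s[j - L:j] == prefix))
--     return result
-- ===== Notes on version B (the rewrite author's own statement) =====
-- stated objective: simpler
-- what changed: Replaces the KMP prefix-function and its three in-place accumulation passes by a direct definition-level count: for each prefix length L, count the positions j with s[j-L:j] == s[:L]; result[0] stays n+1.
import Mathlib
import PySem

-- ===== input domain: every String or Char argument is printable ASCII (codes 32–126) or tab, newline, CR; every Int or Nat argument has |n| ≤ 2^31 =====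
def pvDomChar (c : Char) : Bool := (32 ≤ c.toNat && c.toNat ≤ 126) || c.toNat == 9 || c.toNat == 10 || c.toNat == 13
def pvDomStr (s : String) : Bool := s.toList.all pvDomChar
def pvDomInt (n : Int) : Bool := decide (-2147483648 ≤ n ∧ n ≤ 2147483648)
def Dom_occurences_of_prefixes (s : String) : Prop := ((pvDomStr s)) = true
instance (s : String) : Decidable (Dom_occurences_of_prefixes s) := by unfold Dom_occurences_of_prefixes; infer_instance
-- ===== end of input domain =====

-- B replaces the KMP prefix-function and its three accumulation passes by a direct
-- definition-level count of the occurrences of each prefix (objective: simpler; not faster).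

-- ===== PORT A =====
-- the inner `while j > 0 and s[i] != s[j]: j = pi[j-1]` loop; `fuel` only makes the
-- recursion structural: it is started with fuel = j, which always suffices because
-- each step strictly decreases j (pi[j-1] <= j-1 by construction of pi).
def piWhileA (cs : List Char) (pl : List Nat) (i : Nat) : Nat → Nat → Nat
  | j, 0 => j
  | j, fuel + 1 =>
    if 0 < j ∧ cs.getD i ' ' ≠ cs.getD j ' ' then piWhileA cs pl i (pl.getD (j - 1) 0) fuel else j

-- helper `prefix_function` of A; indices i run over range(1, n); all list reads are
-- provably in range, so getD is exact for Python's indexing here.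
def prefix_function (cs : List Char) : List Nat :=
  (List.range' 1 (cs.length - 1)).foldl (fun pl i =>
      let j0 := pl.getD (i - 1) 0
      let j1 := piWhileA cs pl i j0 j0
      let j2 := if cs.getD i ' ' = cs.getD j1 ' ' then j1 + 1 else j1
      pl.set i j2)
    (List.replicate cs.length 0)

def occurences_of_prefixes (s : String) : List Int :=
  let cs := s.toList
  let n := cs.length
  let pi := prefix_function cs
  let r0 : List Int := List.replicate (n + 1) 0
  -- for i in range(n): result[pi[i]] += 1
  let r1 := (List.range n).foldl (fun r i => r.set (pi.getD i 0) (r.getD (pi.getD i 0) 0 + 1)) r0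
  -- for i in range(n-1, 0, -1): result[pi[i-1]] += result[i]
  let r2 := ((List.range' 1 (n - 1)).reverse).foldl
      (fun r i => r.set (pi.getD (i - 1) 0) (r.getD (pi.getD (i - 1) 0) 0 + r.getD i 0)) r1
  -- for i in range(n+1): result[i] += 1
  (List.range (n + 1)).foldl (fun r i => r.set i (r.getD i 0 + 1)) r2

-- ===== PORT B =====
-- result[0] = n+1; result[L] = number of j in [L, n] with s[j-L:j] == s[:L]
def occurences_of_prefixes_alt (s : String) : List Int :=
  let cs := s.toList
  let n := cs.length
  ((n : Int) + 1) :: (List.range' 1 n).map (fun L =>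
      let pre := cs.take L
      (((List.range' L (n + 1 - L)).countP (fun j => (cs.drop (j - L)).take L == pre) : Nat) : Int))

-- ===== PRECONDITION & SPEC =====
def Spec_occurences_of_prefixes (s : String) (out : List Int) : Prop := out = occurences_of_prefixes_alt s
instance (s : String) (out : List Int) : Decidable (Spec_occurences_of_prefixes s out) := by unfold Spec_occurences_of_prefixes; infer_instance

-- ===== CLAIM (what is proved, stated in full; the proofs are below) =====
def Claim_equal_occurences_of_prefixes : Prop := ∀ (s : String), Dom_occurences_of_prefixes s → Spec_occurences_of_prefixes s (occurences_of_prefixes s)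

-- ===== LEMMAS AND PROOFS =====

-- ---- generic list utilities ----

theorem pv_getD_set {α : Type} (r : List α) (k m : Nat) (v d : α) (hk : k < r.length) :
    (r.set k v).getD m d = if m = k then v else r.getD m d := by
  by_cases h : m = k
  · subst h; simp [List.getD, List.getElem?_set_self', List.getElem?_eq_getElem hk]
  · simp [List.getD, List.getElem?_set_ne (by omega : k ≠ m), h]

theorem pv_foldl_set_length (k : Nat → Nat) (v : List Int → Nat → Int) :
    ∀ (idxs : List Nat) (r : List Int),
      (idxs.foldl (fun r i => r.set (k i) (v r i)) r).length = r.length := by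
  intro idxs
  induction idxs with
  | nil => intro r; rfl
  | cons i t ih => intro r; simp only [List.foldl_cons]; rw [ih]; simp

theorem pv_foldl_congr {α β : Type} :
    ∀ (l : List β) (f g : α → β → α) (a : α),
      (∀ (x : α) (y : β), y ∈ l → f x y = g x y) → l.foldl f a = l.foldl g a := by
  intro l
  induction l with
  | nil => intro f g a _; rfl
  | cons b t ih =>
    intro f g a h
    simp only [List.foldl_cons]
    rw [h a b (by simp), ih f g _ (fun x y hy => h x y (by simp [hy]))]

theorem pv_countP_range_eq_sum (p : Nat → Bool) :
    ∀ n : Nat, (List.range n).countP p = ∑ i ∈ Finset.range n, if p i then 1 else 0 := by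
  intro n
  induction n with
  | zero => rfl
  | succ n ih =>
    rw [List.range_succ, List.countP_append, Finset.sum_range_succ, ih]
    simp [List.countP_cons]

-- ---- suffix / border basics ----

theorem pv_take_concat (cs : List Char) (e : Nat) (he : e < cs.length) :
    cs.take (e + 1) = cs.take e ++ [cs.getD e ' '] := by
  rw [List.take_succ, List.getElem?_eq_getElem he]
  simp [List.getD, List.getElem?_eq_getElem he]

theorem pv_suffix_concat_char (a b : List Char) (x y : Char) :
    (a ++ [x]) <:+ (b ++ [y]) ↔ (x = y ∧ a <:+ b) := by
  rw [← List.reverse_prefix]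
  simp only [List.reverse_append, List.reverse_cons, List.reverse_nil, List.nil_append,
    List.singleton_append]
  rw [List.cons_prefix_cons, List.reverse_prefix]

theorem pv_suffix_char (cs : List Char) (j e : Nat) (hje : j ≤ e) (he : e < cs.length) :
    (cs.take (j + 1) <:+ cs.take (e + 1)) ↔
      (cs.take j <:+ cs.take e ∧ cs.getD e ' ' = cs.getD j ' ') := by
  rw [pv_take_concat cs e he, pv_take_concat cs j (by omega), pv_suffix_concat_char]
  tauto

theorem pv_suffix_of_suffix_le (u v w : List Char) (hu : u <:+ w) (hv : v <:+ w)
    (hl : u.length ≤ v.length) : u <:+ v := by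
  rw [← List.reverse_prefix] at hu hv ⊢
  exact List.prefix_of_prefix_length_le hu hv (by simpa using hl)

-- ---- the specification-level prefix function ----

def piSpec (cs : List Char) (i : Nat) : Nat :=
  Nat.findGreatest (fun j => cs.take j <:+ cs.take (i + 1)) i

theorem piSpec_le (cs : List Char) (i : Nat) : piSpec cs i ≤ i := Nat.findGreatest_le i

theorem piSpec_suffix (cs : List Char) (i : Nat) : cs.take (piSpec cs i) <:+ cs.take (i + 1) :=
  Nat.findGreatest_spec (P := fun j => cs.take j <:+ cs.take (i + 1)) (m := 0) (Nat.zero_le i)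
    (by simp)

theorem le_piSpec (cs : List Char) (i m : Nat) (hm : m ≤ i) (h : cs.take m <:+ cs.take (i + 1)) :
    m ≤ piSpec cs i := Nat.le_findGreatest hm h

theorem piSpec_zero (cs : List Char) : piSpec cs 0 = 0 := rfl

-- the while loop, at specification level
def loopSpec (cs : List Char) (c : Char) (j : Nat) : Nat :=
  if h : 0 < j ∧ c ≠ cs.getD j ' ' then loopSpec cs c (piSpec cs (j - 1)) else j
termination_by j
decreasing_by
  have := piSpec_le cs (j - 1); omega

theorem loop_main (cs : List Char) (i : Nat) (h1 : 1 ≤ i) (hi : i < cs.length) :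
    ∀ j, j + 1 ≤ i → cs.take j <:+ cs.take i → piSpec cs i ≤ j + 1 →
      (if cs.getD i ' ' = cs.getD (loopSpec cs (cs.getD i ' ') j) ' '
        then loopSpec cs (cs.getD i ' ') j + 1 else loopSpec cs (cs.getD i ' ') j) = piSpec cs i := by
  intro j
  induction j using Nat.strong_induction_on with
  | _ j ih =>
    intro hji hsuf hbound
    by_cases hc : 0 < j ∧ cs.getD i ' ' ≠ cs.getD j ' '
    · -- continue: j := piSpec (j-1)
      rw [loopSpec, dif_pos hc]
      have hj1 : j - 1 + 1 = j := by omega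
      have hsuf' : cs.take (piSpec cs (j - 1)) <:+ cs.take i := by
        have h2 := piSpec_suffix cs (j - 1)
        rw [hj1] at h2
        exact h2.trans hsuf
      have hlt : piSpec cs (j - 1) < j := by have := piSpec_le cs (j - 1); omega
      refine ih _ hlt (by omega) hsuf' ?_
      -- piSpec i ≤ piSpec (j-1) + 1
      by_contra hgt
      push_neg at hgt
      set m := piSpec cs i with hm
      have hm1 : 1 ≤ m := by omega
      have hms : cs.take m <:+ cs.take (i + 1) := piSpec_suffix cs i
      have hmi : m ≤ i := piSpec_le cs i
      have hmeq : m - 1 + 1 = m := by omega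
      rw [← hmeq] at hms
      rw [pv_suffix_char cs (m - 1) i (by omega) hi] at hms
      obtain ⟨hms1, hms2⟩ := hms
      have hmj : m - 1 ≠ j := by
        intro hh
        exact hc.2 (by rw [hms2, hh])
      have hmlt : m - 1 < j := by omega
      have hsj : cs.take (m - 1) <:+ cs.take j := by
        apply pv_suffix_of_suffix_le _ _ _ hms1 hsuf
        rw [List.length_take, List.length_take]
        omega
      rw [← hj1] at hsj
      have := le_piSpec cs (j - 1) (m - 1) (by omega) hsj
      omega
    · -- exit
      rw [loopSpec, dif_neg hc]
      push_neg at hc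
      by_cases hmatch : cs.getD i ' ' = cs.getD j ' '
      · rw [if_pos hmatch]
        -- piSpec i = j + 1
        refine le_antisymm ?_ hbound
        apply le_piSpec cs i (j + 1) hji
        rw [pv_suffix_char cs j i (by omega) hi]
        exact ⟨hsuf, hmatch⟩
      · rw [if_neg hmatch]
        have hj0 : j = 0 := by
          by_contra hj
          exact hmatch (hc (by omega))
        subst hj0
        -- piSpec i = 0
        by_contra hne
        have hm1 : 1 ≤ piSpec cs i := by omega
        have hms : cs.take (piSpec cs i) <:+ cs.take (i + 1) := piSpec_suffix cs i
        set m := piSpec cs i with hm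
        have hmeq : m - 1 + 1 = m := by omega
        rw [← hmeq, pv_suffix_char cs (m - 1) i (by have := piSpec_le cs i; omega) hi] at hms
        have : m - 1 = 0 := by omega
        exact hmatch (by rw [hms.2, this])

theorem kmp_step (cs : List Char) (i : Nat) (h1 : 1 ≤ i) (hi : i < cs.length) :
    (if cs.getD i ' ' = cs.getD (loopSpec cs (cs.getD i ' ') (piSpec cs (i - 1))) ' '
      then loopSpec cs (cs.getD i ' ') (piSpec cs (i - 1)) + 1
      else loopSpec cs (cs.getD i ' ') (piSpec cs (i - 1))) = piSpec cs i := by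
  have hi1 : i - 1 + 1 = i := by omega
  apply loop_main cs i h1 hi
  · have := piSpec_le cs (i - 1); omega
  · have h2 := piSpec_suffix cs (i - 1); rwa [hi1] at h2
  · by_cases h0 : piSpec cs i = 0
    · omega
    · set m := piSpec cs i with hm
      have hms : cs.take m <:+ cs.take (i + 1) := piSpec_suffix cs i
      have hmeq : m - 1 + 1 = m := by omega
      rw [← hmeq, pv_suffix_char cs (m - 1) i (by have := piSpec_le cs i; omega) hi] at hms
      have h3 : cs.take (m - 1) <:+ cs.take (i - 1 + 1) := by rw [hi1]; exact hms.1
      have := le_piSpec cs (i - 1) (m - 1) (by have := piSpec_le cs i; omega) h3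
      omega

-- ---- the port's while loop and pi-array agree with the spec ----

theorem piWhileA_eq (cs : List Char) (pl : List Nat) (i : Nat)
    (hagree : ∀ k, k < i → pl.getD k 0 = piSpec cs k) :
    ∀ fuel j, j ≤ fuel → j < i → piWhileA cs pl i j fuel = loopSpec cs (cs.getD i ' ') j := by
  intro fuel
  induction fuel with
  | zero =>
    intro j hj _
    have : j = 0 := by omega
    subst this
    rw [piWhileA, loopSpec, dif_neg (by simp)]
  | succ fuel ih =>
    intro j hj hji
    rw [piWhileA]
    by_cases hc : 0 < j ∧ cs.getD i ' ' ≠ cs.getD j ' '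
    · rw [if_pos hc, loopSpec, dif_pos hc, hagree (j - 1) (by omega)]
      exact ih _ (by have := piSpec_le cs (j - 1); omega) (by have := piSpec_le cs (j - 1); omega)
    · rw [if_neg hc, loopSpec, dif_neg hc]

def piStepA (cs : List Char) : List Nat -> Nat -> List Nat := fun pl i =>
  let j0 := pl.getD (i - 1) 0
  let j1 := piWhileA cs pl i j0 j0
  let j2 := if cs.getD i ' ' = cs.getD j1 ' ' then j1 + 1 else j1
  pl.set i j2

theorem prefix_function_eq (cs : List Char) :
    prefix_function cs = (List.range' 1 (cs.length - 1)).foldl (piStepA cs)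
      (List.replicate cs.length 0) := rfl

theorem prefix_function_inv (cs : List Char) :
    ∀ m, m ≤ cs.length - 1 →
      ((List.range' 1 m).foldl (piStepA cs) (List.replicate cs.length 0)).length = cs.length ∧
      (∀ k, k < cs.length →
        ((List.range' 1 m).foldl (piStepA cs) (List.replicate cs.length 0)).getD k 0 =
          if k ≤ m then piSpec cs k else 0) := by
  intro m
  induction m with
  | zero =>
    intro _
    refine ⟨by simp, ?_⟩
    intro k hk
    simp only [List.range'_zero, List.foldl_nil]
    rw [List.getD_eq_getElem _ _ (by simpa using hk)]
    simp only [List.getElem_replicate]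
    by_cases h : k ≤ 0
    · have : k = 0 := by omega
      subst this; rw [if_pos (le_refl 0), piSpec_zero]
    · rw [if_neg h]
  | succ m ih =>
    intro hm
    have hmn : m ≤ cs.length - 1 := by omega
    obtain ⟨hlen, hval⟩ := ih hmn
    rw [List.range'_concat, List.foldl_append, List.foldl_cons, List.foldl_nil]
    simp only [Nat.one_mul]
    set pl := (List.range' 1 m).foldl (piStepA cs) (List.replicate cs.length 0) with hpl
    have him : m + 1 < cs.length := by omega
    have hagree : ∀ k, k < m + 1 → pl.getD k 0 = piSpec cs k := by
      intro k hk
      rw [hval k (by omega), if_pos (by omega)]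
    have hstep : piStepA cs pl (1 + m) = pl.set (m + 1) (piSpec cs (m + 1)) := by
      simp only [piStepA]
      rw [show (1 + m - 1) = m by omega, show (1 + m) = m + 1 by omega]
      rw [hagree m (by omega)]
      rw [piWhileA_eq cs pl (m + 1) hagree (piSpec cs m) (piSpec cs m) (le_refl _)
        (by have := piSpec_le cs m; omega)]
      have hks := kmp_step cs (m + 1) (by omega) him
      rw [show (m + 1 - 1) = m by omega] at hks
      rw [hks]
    rw [hstep]
    refine ⟨by simp [hlen], ?_⟩
    intro k hk
    rw [pv_getD_set _ _ _ _ _ (by rw [hlen]; omega)]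
    by_cases hkm : k = m + 1
    · subst hkm; rw [if_pos rfl, if_pos (le_refl _)]
    · rw [if_neg hkm, hval k hk]
      by_cases h2 : k ≤ m
      · rw [if_pos h2, if_pos (by omega)]
      · rw [if_neg h2, if_neg (by omega)]

theorem prefix_function_getD (cs : List Char) (k : Nat) (hk : k < cs.length) :
    (prefix_function cs).getD k 0 = piSpec cs k := by
  obtain ⟨_, hval⟩ := prefix_function_inv cs (cs.length - 1) (le_refl _)
  rw [prefix_function_eq, hval k hk, if_pos (by omega)]

-- ---- the border chain and the counting quantities ----

def chain (cs : List Char) (i : Nat) : List Nat :=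
  if h : piSpec cs i = 0 then [0] else piSpec cs i :: chain cs (piSpec cs i - 1)
termination_by i
decreasing_by
  have := piSpec_le cs i; omega

def G (cs : List Char) (L : Nat) : Nat :=
  ∑ k ∈ Finset.range cs.length, if L ∈ chain cs k then 1 else 0

def cnt1 (cs : List Char) (L : Nat) : Nat :=
  ∑ i ∈ Finset.range cs.length, if piSpec cs i = L then 1 else 0

theorem chain_le (cs : List Char) : ∀ i, ∀ x ∈ chain cs i, x ≤ piSpec cs i := by
  intro i
  induction i using Nat.strong_induction_on with
  | _ i ih =>
    intro x hx
    rw [chain] at hx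
    by_cases h : piSpec cs i = 0
    · rw [dif_pos h] at hx
      simp at hx
      omega
    · rw [dif_neg h] at hx
      rcases List.mem_cons.mp hx with h1 | h1
      · omega
      · have hlt : piSpec cs i - 1 < i := by have := piSpec_le cs i; omega
        have := ih _ hlt x h1
        have := piSpec_le cs (piSpec cs i - 1)
        omega

theorem chain_zero_mem (cs : List Char) : ∀ i, 0 ∈ chain cs i := by
  intro i
  induction i using Nat.strong_induction_on with
  | _ i ih =>
    rw [chain]
    by_cases h : piSpec cs i = 0
    · rw [dif_pos h]; simp
    · rw [dif_neg h]
      exact List.mem_cons.mpr (Or.inr (ih _ (by have := piSpec_le cs i; omega)))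

-- membership in the chain = being a proper border length (or 0)
theorem chain_mem_iff (cs : List Char) :
    ∀ i, i < cs.length → ∀ L,
      (L ∈ chain cs i ↔ (L = 0 ∨ (1 ≤ L ∧ L ≤ i ∧ cs.take L <:+ cs.take (i + 1)))) := by
  intro i
  induction i using Nat.strong_induction_on with
  | _ i ih =>
    intro hi L
    constructor
    · intro hL
      rw [chain] at hL
      by_cases h : piSpec cs i = 0
      · rw [dif_pos h] at hL
        simp at hL
        exact Or.inl hL
      · rw [dif_neg h] at hL
        rcases List.mem_cons.mp hL with h1 | h1
        · subst h1
          exact Or.inr ⟨by omega, piSpec_le cs i, piSpec_suffix cs i⟩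
        · have hlt : piSpec cs i - 1 < i := by have := piSpec_le cs i; omega
          rcases (ih _ hlt (by omega) L).mp h1 with h2 | ⟨h2, h3, h4⟩
          · exact Or.inl h2
          · refine Or.inr ⟨h2, by have := piSpec_le cs i; omega, ?_⟩
            have hsp := piSpec_suffix cs i
            have : piSpec cs i - 1 + 1 = piSpec cs i := by omega
            rw [this] at h4
            exact h4.trans hsp
    · intro hL
      rcases hL with h | ⟨h1, h2, h3⟩
      · subst h; exact chain_zero_mem cs i
      · have hLpi : L ≤ piSpec cs i := le_piSpec cs i L h2 h3
        have hpi1 : 1 ≤ piSpec cs i := by omega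
        rw [chain, dif_neg (by omega)]
        by_cases hLe : L = piSpec cs i
        · exact List.mem_cons.mpr (Or.inl hLe)
        · refine List.mem_cons.mpr (Or.inr ?_)
          have hlt : piSpec cs i - 1 < i := by have := piSpec_le cs i; omega
          rw [ih _ hlt (by omega) L]
          refine Or.inr ⟨h1, by omega, ?_⟩
          have hsuffix : cs.take L <:+ cs.take (piSpec cs i) := by
            apply pv_suffix_of_suffix_le _ _ _ h3 (piSpec_suffix cs i)
            rw [List.length_take, List.length_take]
            have := piSpec_le cs i
            omega
          have : piSpec cs i - 1 + 1 = piSpec cs i := by omega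
          rw [this]
          exact hsuffix

-- per-index decomposition of the chain-membership count
def cntIn (cs : List Char) (k L : Nat) : Nat :=
  ∑ i ∈ Finset.range cs.length,
    if 1 ≤ i ∧ i ∈ chain cs k ∧ piSpec cs (i - 1) = L then 1 else 0

theorem perK (cs : List Char) :
    ∀ k, k < cs.length → ∀ L,
      (if L ∈ chain cs k then 1 else 0) = (if piSpec cs k = L then 1 else 0) + cntIn cs k L := by
  intro k
  induction k using Nat.strong_induction_on with
  | _ k ih =>
    intro hk L
    by_cases h : piSpec cs k = 0
    · have hch : chain cs k = [0] := by rw [chain, dif_pos h]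
      have hcnt : cntIn cs k L = 0 := by
        apply Finset.sum_eq_zero
        intro i _
        rw [if_neg]
        rintro ⟨hi1, hi2, _⟩
        rw [hch] at hi2
        simp at hi2
        omega
      rw [hcnt, hch, h]
      simp [eq_comm]
    · set m := piSpec cs k with hm
      have hm1 : 1 ≤ m := by omega
      have hmk : m ≤ k := piSpec_le cs k
      have hch : chain cs k = m :: chain cs (m - 1) := by rw [chain, dif_neg h]
      have htail_lt : ∀ x ∈ chain cs (m - 1), x < m := by
        intro x hx
        have h1x := chain_le cs (m - 1) x hx
        have h2x := piSpec_le cs (m - 1)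
        omega
      have hsplit : cntIn cs k L =
          (if piSpec cs (m - 1) = L then 1 else 0) + cntIn cs (m - 1) L := by
        unfold cntIn
        have hpt : ∀ i ∈ Finset.range cs.length,
            (if 1 ≤ i ∧ i ∈ chain cs k ∧ piSpec cs (i - 1) = L then 1 else 0) =
            ((if i = m then (if piSpec cs (m - 1) = L then 1 else 0) else 0) +
             (if 1 ≤ i ∧ i ∈ chain cs (m - 1) ∧ piSpec cs (i - 1) = L then 1 else 0) : ℕ) := by
          intro i _
          by_cases him : i = m
          · have hnotm : m ∉ chain cs (m - 1) := fun hmem => absurd (htail_lt m hmem) (by omega)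
            rw [him, if_pos rfl]
            have hmem : m ∈ chain cs k := by rw [hch]; exact List.mem_cons_self
            by_cases hl : piSpec cs (m - 1) = L
            · rw [if_pos hl, if_pos ⟨by omega, hmem, hl⟩, if_neg (by
                rintro ⟨_, hcm, _⟩; exact hnotm hcm)]
            · rw [if_neg (by rintro ⟨_, _, hcl⟩; exact hl hcl), if_neg hl,
                if_neg (by rintro ⟨_, _, hcl⟩; exact hl hcl)]
          · rw [if_neg him, Nat.zero_add]
            have hiff : (i ∈ chain cs k) ↔ (i ∈ chain cs (m - 1)) := by
              rw [hch, List.mem_cons]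
              constructor
              · rintro (h1 | h1)
                · exact absurd h1 him
                · exact h1
              · exact fun h1 => Or.inr h1
            simp only [hiff]
        have hsum := Finset.sum_congr rfl hpt
        rw [hsum, Finset.sum_add_distrib]
        congr 1
        rw [Finset.sum_ite_eq' (Finset.range cs.length) m
          (fun _ => if piSpec cs (m - 1) = L then 1 else 0)]
        rw [if_pos (Finset.mem_range.mpr (by omega))]
      have heqc : (if L = m then 1 else 0) = (if m = L then (1:ℕ) else 0) := by
        by_cases h1 : L = m
        · rw [if_pos h1, if_pos h1.symm]
        · rw [if_neg h1, if_neg (fun h2 => h1 h2.symm)]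
      have hih := ih (m - 1) (by omega) (by omega) L
      have hLch : (if L ∈ chain cs k then 1 else 0) =
          ((if L = m then 1 else 0) + (if L ∈ chain cs (m - 1) then 1 else 0) : ℕ) := by
        rw [hch]
        by_cases h1 : L = m
        · rw [if_pos h1, if_pos (List.mem_cons.mpr (Or.inl h1)), if_neg (by
            intro hmem; have := htail_lt L hmem; omega)]
        · rw [if_neg h1]
          by_cases h2 : L ∈ chain cs (m - 1)
          · rw [if_pos h2, if_pos (List.mem_cons.mpr (Or.inr h2))]
          · rw [if_neg h2, if_neg (by
              intro h3
              rcases List.mem_cons.mp h3 with h4 | h4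
              · exact h1 h4
              · exact h2 h4)]
      rw [hLch, hih, hsplit, heqc]

-- the fundamental counting recurrence
theorem recG (cs : List Char) (L : Nat) :
    G cs L = cnt1 cs L +
      ∑ i ∈ Finset.Ico 1 cs.length, if piSpec cs (i - 1) = L then G cs i else 0 := by
  have h1 : ∀ k ∈ Finset.range cs.length,
      (if L ∈ chain cs k then 1 else 0) =
      ((if piSpec cs k = L then 1 else 0) + cntIn cs k L : ℕ) := by
    intro k hkr
    exact perK cs k (Finset.mem_range.mp hkr) L
  have hsum1 := Finset.sum_congr rfl h1
  have hG : G cs L = cnt1 cs L + ∑ k ∈ Finset.range cs.length, cntIn cs k L := by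
    unfold G cnt1
    rw [hsum1, Finset.sum_add_distrib]
  rw [hG]
  congr 1
  unfold cntIn
  rw [Finset.sum_comm]
  have h2 : ∀ i ∈ Finset.range cs.length,
      (∑ k ∈ Finset.range cs.length,
        if 1 ≤ i ∧ i ∈ chain cs k ∧ piSpec cs (i - 1) = L then 1 else 0) =
      (if 1 ≤ i ∧ piSpec cs (i - 1) = L then G cs i else 0 : ℕ) := by
    intro i _
    by_cases hc : 1 ≤ i ∧ piSpec cs (i - 1) = L
    · rw [if_pos hc]
      unfold G
      apply Finset.sum_congr rfl
      intro k _
      by_cases hmem : i ∈ chain cs k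
      · rw [if_pos ⟨hc.1, hmem, hc.2⟩, if_pos hmem]
      · rw [if_neg (by rintro ⟨_, h3, _⟩; exact hmem h3), if_neg hmem]
    · rw [if_neg hc]
      apply Finset.sum_eq_zero
      intro k _
      rw [if_neg (by rintro ⟨h3, _, h4⟩; exact hc ⟨h3, h4⟩)]
  have hsum2 := Finset.sum_congr rfl h2
  rw [hsum2]
  rcases Nat.eq_zero_or_pos cs.length with h0 | h0
  · rw [h0]; simp
  · rw [Finset.range_eq_Ico, Finset.sum_eq_sum_Ico_succ_bot h0]
    rw [if_neg (by simp), Nat.zero_add]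
    apply Finset.sum_congr rfl
    intro i hi
    have h1i : 1 ≤ i := (Finset.mem_Ico.mp hi).1
    by_cases hc : piSpec cs (i - 1) = L
    · rw [if_pos ⟨h1i, hc⟩, if_pos hc]
    · rw [if_neg (by tauto), if_neg hc]

-- ---- the three accumulation passes of port A ----

theorem pv_getD_replicate0 (m L : Nat) : (List.replicate m (0 : Int)).getD L 0 = 0 := by
  simp only [List.getD, List.getElem?_replicate]
  split <;> rfl

theorem pv_foldl_bump (f : Nat → Nat) :
    ∀ (idxs : List Nat) (r : List Int) (L : Nat), (∀ i ∈ idxs, f i < r.length) →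
      ((idxs.foldl (fun r i => r.set (f i) (r.getD (f i) 0 + 1)) r).getD L 0
        = r.getD L 0 + (idxs.countP (fun i => decide (f i = L)) : Int)) := by
  intro idxs
  induction idxs with
  | nil => intro r L _; simp
  | cons i t ihh =>
    intro r L hf
    simp only [List.foldl_cons, List.countP_cons]
    rw [ihh _ _ (fun x hx => by
      rw [List.length_set]; exact hf x (List.mem_cons_of_mem _ hx))]
    rw [pv_getD_set _ _ _ _ _ (hf i List.mem_cons_self)]
    by_cases hL : L = f i
    · rw [if_pos hL, if_pos (by simp [hL]), hL]
      push_cast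
      ring
    · rw [if_neg hL, if_neg (by simp only [decide_eq_true_eq]; omega)]
      push_cast
      ring

theorem pv_foldl_inc :
    ∀ (m : Nat) (r : List Int), m ≤ r.length → ∀ L,
      (((List.range m).foldl (fun r i => r.set i (r.getD i 0 + 1)) r)).getD L 0
        = r.getD L 0 + (if L < m then 1 else 0) := by
  intro m
  induction m with
  | zero => intro r _ L; simp
  | succ m ihh =>
    intro r hm L
    rw [List.range_succ, List.foldl_append, List.foldl_cons, List.foldl_nil]
    have hqlen : ((List.range m).foldl (fun r i => r.set i (r.getD i 0 + 1)) r).length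
        = r.length := pv_foldl_set_length _ _ _ _
    rw [pv_getD_set _ _ _ _ _ (by omega)]
    by_cases hL : L = m
    · rw [if_pos hL, ihh r (by omega) m, hL, if_neg (by omega), if_pos (by omega)]
      ring
    · rw [if_neg hL, ihh r (by omega) L]
      by_cases h2 : L < m
      · rw [if_pos h2, if_pos (by omega)]
      · rw [if_neg h2, if_neg (by omega)]

def S2 (cs : List Char) (t L : Nat) : Nat :=
  ∑ i ∈ Finset.Ico (t + 1) cs.length, if piSpec cs (i - 1) = L then G cs i else 0

theorem pv_S2_full (cs : List Char) (t L : Nat) (ht : t ≤ L) :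
    cnt1 cs L + S2 cs t L = G cs L := by
  rw [recG cs L]
  congr 1
  unfold S2
  by_cases hcase : t + 1 ≤ cs.length
  · rw [← Finset.sum_Ico_consecutive _ (by omega : 1 ≤ t + 1) hcase]
    have hzero : ∑ i ∈ Finset.Ico 1 (t + 1), (if piSpec cs (i - 1) = L then G cs i else 0) = 0 := by
      apply Finset.sum_eq_zero
      intro i hi
      have hi2 := Finset.mem_Ico.mp hi
      rw [if_neg]
      have := piSpec_le cs (i - 1)
      omega
    rw [hzero, Nat.zero_add]
  · have hzero : ∑ i ∈ Finset.Ico 1 cs.length, (if piSpec cs (i - 1) = L then G cs i else 0) = 0 := by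
      apply Finset.sum_eq_zero
      intro i hi
      have hi2 := Finset.mem_Ico.mp hi
      rw [if_neg]
      have := piSpec_le cs (i - 1)
      omega
    have hzero2 : ∑ i ∈ Finset.Ico (t + 1) cs.length,
        (if piSpec cs (i - 1) = L then G cs i else 0) = 0 := by
      apply Finset.sum_eq_zero
      intro i hi
      have hi2 := Finset.mem_Ico.mp hi
      rw [if_neg]
      have := piSpec_le cs (i - 1)
      omega
    rw [hzero, hzero2]

theorem pass2_inv (cs : List Char) :
    ∀ (t : Nat) (r : List Int), t ≤ cs.length - 1 → 1 ≤ cs.length → r.length = cs.length + 1 →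
      (∀ L, L ≤ cs.length → r.getD L 0 = ((cnt1 cs L + S2 cs t L : ℕ) : Int)) →
      ∀ L, L ≤ cs.length →
        (((List.range' 1 t).reverse).foldl
          (fun r i => r.set (piSpec cs (i - 1)) (r.getD (piSpec cs (i - 1)) 0 + r.getD i 0)) r).getD L 0
          = ((G cs L : ℕ) : Int) := by
  intro t
  induction t with
  | zero =>
    intro r _ hn hlen hinv L hL
    simp only [List.range'_zero, List.reverse_nil, List.foldl_nil]
    rw [hinv L hL]
    rw [show cnt1 cs L + S2 cs 0 L = G cs L from pv_S2_full cs 0 L (by omega)]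
  | succ t iht =>
    intro r ht hn hlen hinv L hL
    rw [List.range'_concat, Nat.one_mul, List.reverse_append, List.reverse_singleton,
      List.singleton_append, List.foldl_cons]
    rw [show (1 + t) = t + 1 by omega]
    have hpt : piSpec cs (t + 1 - 1) = piSpec cs t := by rw [show (t + 1 - 1) = t by omega]
    rw [hpt]
    have hrt : r.getD (t + 1) 0 = ((G cs (t + 1) : ℕ) : Int) := by
      rw [hinv (t + 1) (by omega)]
      rw [show cnt1 cs (t + 1) + S2 cs (t + 1) (t + 1) = G cs (t + 1) from
        pv_S2_full cs (t + 1) (t + 1) (le_refl _)]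
    refine iht _ (by omega) hn (by rw [List.length_set]; exact hlen) ?_ L hL
    intro M hM
    have hpit : piSpec cs t < r.length := by
      have := piSpec_le cs t
      omega
    rw [pv_getD_set _ _ _ _ _ hpit]
    have hS2 : S2 cs t M = (if piSpec cs t = M then G cs (t + 1) else 0) + S2 cs (t + 1) M := by
      unfold S2
      rw [Finset.sum_eq_sum_Ico_succ_bot (by omega : t + 1 < cs.length)]
      rw [hpt]
    by_cases hMc : M = piSpec cs t
    · subst hMc
      rw [if_pos rfl, hrt, hinv (piSpec cs t) hM, hS2, if_pos rfl]
      push_cast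
      ring
    · rw [if_neg hMc, hinv M hM, hS2, if_neg (fun hcc => hMc hcc.symm)]
      push_cast
      ring

-- ---- characterization of port A's output ----

theorem portA_char (s : String) :
    (occurences_of_prefixes s).length = s.toList.length + 1 ∧
    (∀ L, L ≤ s.toList.length →
      (occurences_of_prefixes s).getD L 0 = ((G s.toList L : ℕ) : Int) + 1) := by
  set cs := s.toList with hcs
  set n := cs.length with hn
  have hr0len : (List.replicate (n + 1) (0 : Int)).length = n + 1 := by simp
  have hc1 : ∀ r : List Int,
      (List.range n).foldl (fun r i => r.set ((prefix_function cs).getD i 0)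
        (r.getD ((prefix_function cs).getD i 0) 0 + 1)) r
      = (List.range n).foldl (fun r i => r.set (piSpec cs i) (r.getD (piSpec cs i) 0 + 1)) r := by
    intro r
    apply pv_foldl_congr
    intro a i hi
    have h2 := List.mem_range.mp hi
    rw [prefix_function_getD cs i (by omega)]
  have hc2 : ∀ r : List Int,
      ((List.range' 1 (n - 1)).reverse).foldl
        (fun r i => r.set ((prefix_function cs).getD (i - 1) 0)
          (r.getD ((prefix_function cs).getD (i - 1) 0) 0 + r.getD i 0)) r
      = ((List.range' 1 (n - 1)).reverse).foldl
        (fun r i => r.set (piSpec cs (i - 1)) (r.getD (piSpec cs (i - 1)) 0 + r.getD i 0)) r := by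
    intro r
    apply pv_foldl_congr
    intro a i hi
    rw [List.mem_reverse] at hi
    have h2 := List.mem_range'_1.mp hi
    rw [prefix_function_getD cs (i - 1) (by omega)]
  have hv1 : ∀ L, L ≤ n →
      ((List.range n).foldl (fun r i => r.set (piSpec cs i) (r.getD (piSpec cs i) 0 + 1))
        (List.replicate (n + 1) (0 : Int))).getD L 0 = ((cnt1 cs L : ℕ) : Int) := by
    intro L hL
    rw [pv_foldl_bump (fun i => piSpec cs i) (List.range n) _ L (by
      intro i hi
      show piSpec cs i < (List.replicate (n + 1) (0 : Int)).length
      have h2 := piSpec_le cs i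
      have h3 := List.mem_range.mp hi
      have h4 := hr0len
      omega)]
    rw [pv_getD_replicate0, pv_countP_range_eq_sum]
    unfold cnt1
    rw [← hn]
    simp
  have hlen1 : ((List.range n).foldl (fun r i => r.set (piSpec cs i) (r.getD (piSpec cs i) 0 + 1))
      (List.replicate (n + 1) (0 : Int))).length = n + 1 := by
    rw [pv_foldl_set_length, hr0len]
  have hv2 : ∀ L, L ≤ n →
      (((List.range' 1 (n - 1)).reverse).foldl
        (fun r i => r.set (piSpec cs (i - 1)) (r.getD (piSpec cs (i - 1)) 0 + r.getD i 0))
        ((List.range n).foldl (fun r i => r.set (piSpec cs i) (r.getD (piSpec cs i) 0 + 1))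
          (List.replicate (n + 1) (0 : Int)))).getD L 0 = ((G cs L : ℕ) : Int) := by
    rcases Nat.eq_zero_or_pos n with h0 | h0
    · intro L hL
      rw [show n - 1 = 0 by omega]
      simp only [List.range'_zero, List.reverse_nil, List.foldl_nil]
      rw [hv1 L hL]
      unfold cnt1 G
      rw [← hn, h0]
      simp
    · intro L hL
      refine pass2_inv cs (n - 1) _ (by omega) (by omega) hlen1 ?_ L (by omega)
      intro M hM
      rw [hv1 M (by omega)]
      have hS0 : S2 cs (n - 1) M = 0 := by
        unfold S2
        rw [show n - 1 + 1 = cs.length from by rw [← hn]; omega]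
        simp
      rw [hS0]
      norm_num
  constructor
  · simp only [occurences_of_prefixes, ← hcs, ← hn]
    rw [hc1, hc2, pv_foldl_set_length, pv_foldl_set_length, pv_foldl_set_length, hr0len]
  · intro L hL
    simp only [occurences_of_prefixes, ← hcs, ← hn]
    rw [hc1, hc2]
    rw [pv_foldl_inc (n + 1) _ (by
      rw [pv_foldl_set_length, pv_foldl_set_length, hr0len]) L]
    rw [hv2 L hL, if_pos (by omega)]

-- ---- characterization of port B's entries ----

theorem pv_suffix_drop (cs : List Char) (L j : Nat) (hLj : L ≤ j) (hj : j ≤ cs.length) :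
    ((cs.drop (j - L)).take L = cs.take L) ↔ (cs.take L <:+ cs.take j) := by
  rw [List.suffix_iff_eq_drop]
  rw [List.length_take, List.length_take]
  rw [show min L cs.length = L by omega, show min j cs.length = j by omega]
  rw [List.drop_take, show j - (j - L) = L by omega]
  exact ⟨fun h => h.symm, fun h => h.symm⟩

theorem pv_sum_ite_eq_countP (P : Nat → Prop) [DecidablePred P] (n : Nat) :
    (∑ k ∈ Finset.range n, if P k then 1 else 0) = (List.range n).countP (fun k => decide (P k)) := by
  rw [pv_countP_range_eq_sum]
  apply Finset.sum_congr rfl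
  intro k _
  simp

theorem pv_G_as_countP (cs : List Char) (L : Nat) (h1 : 1 ≤ L) (hL : L ≤ cs.length) :
    G cs L = (List.range' L (cs.length - L)).countP
      (fun k => decide (cs.take L <:+ cs.take (k + 1))) := by
  unfold G
  rw [pv_sum_ite_eq_countP]
  have hcongr : (List.range cs.length).countP (fun k => decide (L ∈ chain cs k))
      = (List.range cs.length).countP (fun k => decide (L ≤ k ∧ cs.take L <:+ cs.take (k + 1))) := by
    apply List.countP_congr
    intro k hk
    have hkn := List.mem_range.mp hk
    simp only [decide_eq_true_eq]
    rw [chain_mem_iff cs k hkn L]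
    constructor
    · rintro (h2 | ⟨_, h3, h4⟩)
      · omega
      · exact ⟨h3, h4⟩
    · rintro ⟨h3, h4⟩
      exact Or.inr ⟨h1, h3, h4⟩
  rw [hcongr]
  have hsplit : List.range cs.length = List.range' 0 L ++ List.range' L (cs.length - L) := by
    rw [List.range_eq_range']
    rw [show List.range' L (cs.length - L) = List.range' (0 + 1 * L) (cs.length - L) by norm_num]
    rw [List.range'_append]
    congr 1
    omega
  rw [hsplit, List.countP_append]
  have hzero : (List.range' 0 L).countP
      (fun k => decide (L ≤ k ∧ cs.take L <:+ cs.take (k + 1))) = 0 := by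
    rw [List.countP_eq_zero]
    intro k hk
    have h2 := List.mem_range'_1.mp hk
    simp only [decide_eq_true_eq]
    rintro ⟨h3, _⟩
    omega
  rw [hzero, Nat.zero_add]
  apply List.countP_congr
  intro k hk
  have h2 := List.mem_range'_1.mp hk
  simp only [decide_eq_true_eq]
  constructor
  · rintro ⟨_, h3⟩
    exact h3
  · intro h3
    exact ⟨by omega, h3⟩

theorem pv_bridge (cs : List Char) (L : Nat) (h1 : 1 ≤ L) (hL : L ≤ cs.length) :
    (List.range' L (cs.length + 1 - L)).countP
      (fun j => (cs.drop (j - L)).take L == cs.take L) = G cs L + 1 := by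
  have hcongr : (List.range' L (cs.length + 1 - L)).countP
      (fun j => (cs.drop (j - L)).take L == cs.take L)
      = (List.range' L (cs.length + 1 - L)).countP
        (fun j => decide (cs.take L <:+ cs.take j)) := by
    apply List.countP_congr
    intro j hj
    have h2 := List.mem_range'_1.mp hj
    rw [beq_iff_eq, decide_eq_true_eq]
    exact pv_suffix_drop cs L j (by omega) (by omega)
  rw [hcongr]
  rw [show cs.length + 1 - L = (cs.length - L) + 1 by omega, List.range'_succ, List.countP_cons]
  rw [if_pos (by simp only [decide_eq_true_eq]; exact List.suffix_refl _)]
  rw [pv_G_as_countP cs L h1 hL]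
  have hmap1 : List.range' (L + 1) (cs.length - L) = (List.range (cs.length - L)).map ((L + 1) + ·) :=
    List.range'_eq_map_range
  have hmap2 : List.range' L (cs.length - L) = (List.range (cs.length - L)).map (L + ·) :=
    List.range'_eq_map_range
  rw [hmap1, hmap2, List.countP_map, List.countP_map]
  congr 1
  apply List.countP_congr
  intro t _
  simp only [Function.comp_apply]
  rw [show L + 1 + t = L + t + 1 by omega]

theorem pv_G_zero (cs : List Char) : G cs 0 = cs.length := by
  unfold G
  have h1 : ∀ k ∈ Finset.range cs.length, (if (0 : ℕ) ∈ chain cs k then 1 else 0) = 1 := by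
    intro k _
    rw [if_pos (chain_zero_mem cs k)]
  rw [Finset.sum_congr rfl h1]
  simp

-- ---- the two ports agree ----

theorem ports_eq (s : String) : occurences_of_prefixes s = occurences_of_prefixes_alt s := by
  obtain ⟨hAlen, hAval⟩ := portA_char s
  set cs := s.toList with hcs
  set n := cs.length with hn
  have hBlen : (occurences_of_prefixes_alt s).length = n + 1 := by
    simp only [occurences_of_prefixes_alt, ← hcs, ← hn]
    simp [List.length_range']
  apply List.ext_getElem (by omega)
  intro i hi1 hi2
  have hin : i < n + 1 := by omega
  have hA : (occurences_of_prefixes s)[i] = ((G cs i : ℕ) : Int) + 1 := by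
    rw [← List.getD_eq_getElem _ 0 hi1]
    exact hAval i (by omega)
  rw [hA]
  rcases i with _ | L
  · simp only [occurences_of_prefixes_alt, ← hcs, ← hn, List.getElem_cons_zero]
    rw [pv_G_zero, ← hn]
  · have hLn : L < n := by omega
    simp only [occurences_of_prefixes_alt, ← hcs, ← hn, List.getElem_cons_succ, List.getElem_map]
    rw [List.getElem_range' (by simp [List.length_range']; omega)]
    rw [show 1 + 1 * L = L + 1 by omega]
    rw [pv_bridge cs (L + 1) (by omega) (by omega)]
    push_cast
    ring

-- ===== VERDICT (by name: the statement is the Claim_ definition above) =====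
theorem occurences_of_prefixes_spec : Claim_equal_occurences_of_prefixes := by
  intro s _
  show occurences_of_prefixes s = occurences_of_prefixes_alt s
  exact ports_eq s
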